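-- pv_equiv track=rewrite | github.com/Tempura-Roll/ProyectoICC1 | Versiones-Alternas/pregunta2ICC.py | obtener_categorias_movimientos
-- ===== SOURCE A (Python) =====
-- tipos_pokemon = [
--     "Normal", "Fire", "Water", "Electric", "Grass", "Ice", "Fighting", "Poison",
--     "Ground", "Flying", "Psychic", "Bug", "Rock", "Ghost", "Dragon", "Dark",
--     "Steel", "Fairy"
-- ]
--
-- def obtener_categorias_movimientos(movimientos):
--     # Validar entrada
--     if not isinstance(movimientos, str):
--         movimientos = ""
--
--     # Inicializar lista de categorías encontradas
--     categorias_encontradas = []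
--
--     # Buscar cada tipo en la cadena de movimientos
--     for categoria in tipos_pokemon:
--         cantidad_ocurrencias = 0
--         posicion = 0
--
--         # Contar manualmente las ocurrencias
--         while True:
--             indice = movimientos.find(categoria, posicion)
--             if indice == -1:
--                 break
--             cantidad_ocurrencias += 1
--             posicion = indice + 1
--
--         # Agregar las categorías según las ocurrencias encontradas
--         for _ in range(cantidad_ocurrencias):
--             categorias_encontradas.append(categoria)
--
--     # Convertir lista a string separado por espacios
--     return ' '.join(categorias_encontradas)
-- ===== SOURCE B (Python) =====
-- tipos_pokemon = [
--     "Normal", "Fire", "Water", "Electric", "Grass", "Ice", "Fighting", "Poison",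
--     "Ground", "Flying", "Psychic", "Bug", "Rock", "Ghost", "Dragon", "Dark",
--     "Steel", "Fairy"
-- ]
--
-- def obtener_categorias_movimientos(movimientos):
--     # Validar entrada
--     if not isinstance(movimientos, str):
--         movimientos = ""
--
--     # One left-to-right pass over start positions, testing every type at each
--     # position (counts overlapping occurrences, like A's find/posicion+1 loop).
--     counts = {tipo: 0 for tipo in tipos_pokemon}
--     for i in range(len(movimientos)):
--         for tipo in tipos_pokemon:
--             if movimientos.startswith(tipo, i):
--                 counts[tipo] += 1
--
--     # Emit each type in tipos_pokemon order, repeated by its count.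
--     resultado = []
--     for tipo in tipos_pokemon:
--         resultado.extend([tipo] * counts[tipo])
--     return ' '.join(resultado)
-- ===== Notes on version B (the rewrite author's own statement) =====
-- stated objective: alternative
-- what changed: Replaces A's per-type repeated str.find scans (restarting at index+1 for each of the 18 types) with a single left-to-right pass over start positions that tests every type with startswith at each position and accumulates counts in a dict, then emits the types in order.
import Mathlib
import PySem

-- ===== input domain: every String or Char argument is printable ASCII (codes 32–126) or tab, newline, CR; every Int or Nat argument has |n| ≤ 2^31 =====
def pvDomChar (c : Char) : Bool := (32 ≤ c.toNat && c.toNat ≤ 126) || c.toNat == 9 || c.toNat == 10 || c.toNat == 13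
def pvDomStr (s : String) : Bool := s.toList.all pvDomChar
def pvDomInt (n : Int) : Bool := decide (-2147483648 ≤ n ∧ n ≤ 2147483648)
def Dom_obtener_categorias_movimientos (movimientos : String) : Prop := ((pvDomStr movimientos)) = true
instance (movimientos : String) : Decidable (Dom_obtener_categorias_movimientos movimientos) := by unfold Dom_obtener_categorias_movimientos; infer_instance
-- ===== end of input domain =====

-- B replaces A's per-type repeated find scans by one positional pass testing every type
-- with startswith at each index (alternative decomposition, same exact output).

def pvTipos : List String :=
  ["Normal", "Fire", "Water", "Electric", "Grass", "Ice", "Fighting", "Poison",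
   "Ground", "Flying", "Psychic", "Bug", "Rock", "Ghost", "Dragon", "Dark",
   "Steel", "Fairy"]

-- ===== PORT A =====
-- cited by pvCountA's decreasing_by: find(sub, start) is -1 once start passes len(s)
theorem pvFindFrom_of_gt (s cat : List Char) (pos : Nat) (h : s.length < pos) :
    PySem.Chars.findFrom s cat (pos : Int) none = -1 := by
  simp only [PySem.Chars.findFrom]
  rw [if_neg (by omega : ¬((pos : Int) < 0))]
  rw [if_pos (by exact_mod_cast h : ((s.length : Int) < (pos : Int)))]

-- A's inner 'while True: indice = movimientos.find(categoria, posicion); …' loop,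
-- accumulating cantidad_ocurrencias; posicion is a found index + 1, hence a Nat.
def pvCountA (s cat : List Char) (pos : Nat) (acc : Int) : Int :=
  if h : PySem.Chars.findFrom s cat (pos : Int) none = -1 then acc
  else pvCountA s cat ((PySem.Chars.findFrom s cat (pos : Int) none).toNat + 1) (acc + 1)
termination_by s.length + 1 - pos
decreasing_by
  by_cases hp : pos ≤ s.length
  · have h1 := (PySem.Chars.findFrom_natCast_spec s cat pos hp h).1
    omega
  · exact absurd (pvFindFrom_of_gt s cat pos (by omega)) h

def obtener_categorias_movimientos (movimientos : String) : String :=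
  let categorias_encontradas :=
    pvTipos.foldl (fun acc categoria =>
      let cantidad_ocurrencias := pvCountA movimientos.toList categoria.toList 0 0
      (PySem.List.pyRange 0 cantidad_ocurrencias 1).foldl (fun l _ => l ++ [categoria]) acc) []
  PySem.Str.join " " categorias_encontradas

-- ===== PORT B =====
-- movimientos.startswith(tipo, i): exact for 0 ≤ i, the only i's range(len) yields
def obtener_categorias_movimientos_alt (movimientos : String) : String :=
  let counts0 : PySem.Dict String Int :=
    pvTipos.foldl (fun d tipo => d.insert tipo 0) PySem.Dict.empty
  let counts :=
    (PySem.List.pyRange 0 (movimientos.toList.length : Int) 1).foldl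
      (fun d i => pvTipos.foldl
        (fun d tipo =>
          if PySem.Chars.startswith (movimientos.toList.drop i.toNat) tipo.toList
          then d.modify tipo 0 (· + 1) else d) d)
      counts0
  let resultado := pvTipos.foldl
      (fun l tipo => l ++ List.replicate (counts.getD tipo 0).toNat tipo) []
  PySem.Str.join " " resultado

-- ===== PRECONDITION & SPEC =====
def Spec_obtener_categorias_movimientos (movimientos : String) (out : String) : Prop := out = obtener_categorias_movimientos_alt movimientos
instance (movimientos : String) (out : String) : Decidable (Spec_obtener_categorias_movimientos movimientos out) := by unfold Spec_obtener_categorias_movimientos; infer_instance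

-- ===== CLAIM (what is proved, stated in full; the proofs are below) =====
def Claim_equal_obtener_categorias_movimientos : Prop := ∀ (movimientos : String), Dom_obtener_categorias_movimientos movimientos → Spec_obtener_categorias_movimientos movimientos (obtener_categorias_movimientos movimientos)

-- ===== LEMMAS AND PROOFS =====

-- number of overlapping occurrences of cat starting at positions in [pos, len)
def pvN (s cat : List Char) (pos : Nat) : Nat :=
  (List.range' pos (s.length - pos)).countP (fun i => PySem.Chars.startswith (s.drop i) cat)

theorem pvCountA_eq (s cat : List Char) (hcat : cat ≠ []) (pos : Nat) (acc : Int) :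
    pvCountA s cat pos acc = acc + (pvN s cat pos : Int) := by
  induction pos, acc using pvCountA.induct s cat with
  | case1 pos acc h =>
    rw [pvCountA, dif_pos h]
    suffices hz : pvN s cat pos = 0 by rw [hz]; simp
    by_cases hp : pos ≤ s.length
    · have hn := (PySem.Chars.findFrom_natCast_eq_neg_one_iff s cat pos hp).1 h
      unfold pvN
      rw [List.countP_eq_zero]
      intro i hi
      rw [List.mem_range'_1] at hi
      simp only [PySem.Chars.startswith_iff]
      intro hpre
      exact hn (List.infix_iff_prefix_suffix.2
        ⟨List.drop i s, hpre, by
          rw [show List.drop i s = List.drop (i - pos) (List.drop pos s) by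
            rw [List.drop_drop]; congr 1; omega]
          exact List.drop_suffix _ _⟩)
    · unfold pvN
      rw [show s.length - pos = 0 by omega]
      simp
  | case2 pos acc h ih =>
    have hp : pos ≤ s.length := by
      by_contra hgt
      exact h (pvFindFrom_of_gt s cat pos (by omega))
    obtain ⟨h1, h2, h3⟩ := PySem.Chars.findFrom_natCast_spec s cat pos hp h
    set j := (PySem.Chars.findFrom s cat (pos : Int) none).toNat with hj
    have hj1 : pos ≤ j := by omega
    have hjlen : j < s.length := by
      by_contra hge
      exact hcat (List.prefix_nil.1 (by
        rwa [List.drop_eq_nil_of_le (by omega)] at h2))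
    rw [pvCountA, dif_neg h, ih]
    suffices hN : pvN s cat pos = pvN s cat (j + 1) + 1 by rw [hN]; push_cast; ring
    unfold pvN
    rw [show s.length - pos = (j - pos) + (s.length - j) by omega, ← List.range'_append,
      List.countP_append,
      show pos + 1 * (j - pos) = j by omega,
      show s.length - j = (s.length - j - 1) + 1 by omega,
      List.range'_succ, List.countP_cons]
    have hz : (List.range' pos (j - pos)).countP (fun i => PySem.Chars.startswith (s.drop i) cat) = 0 := by
      rw [List.countP_eq_zero]
      intro i hi
      rw [List.mem_range'_1] at hi
      simp only [PySem.Chars.startswith_iff]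
      exact h3 i hi.1 (by omega)
    rw [hz]
    have hpj : PySem.Chars.startswith (s.drop j) cat = true := (PySem.Chars.startswith_iff _ _).2 h2
    rw [hpj]
    have : s.length - (j + 1) = s.length - j - 1 := by omega
    rw [this]
    simp

theorem pvTipos_nodup : pvTipos.Nodup := by decide

theorem pvInnerAux (P : String → Bool) (t : String) : ∀ (l : List String) (d : PySem.Dict String Int),
    (l.foldl (fun d tipo => if P tipo then d.modify tipo 0 (· + 1) else d) d).getD t 0
    = d.getD t 0 + (if P t then (l.count t : Int) else 0) := by
  intro l
  induction l with
  | nil => intro d; simp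
  | cons k l ih =>
    intro d
    rw [List.foldl_cons, ih]
    by_cases hk : P k
    · rw [if_pos hk, PySem.Dict.getD_modify]
      by_cases htk : t = k
      · subst htk
        simp [List.count_cons_self, hk]
        ring
      · simp [htk, Ne.symm htk]
    · rw [if_neg hk]
      by_cases htk : t = k
      · subst htk
        simp [hk]
      · simp [Ne.symm htk]

-- the inner per-position fold over pvTipos, read back at a type t
theorem pvInner_getD (s : List Char) (i : Int) (d : PySem.Dict String Int) (t : String)
    (ht : t ∈ pvTipos) :
    (pvTipos.foldl
      (fun d tipo =>
        if PySem.Chars.startswith (s.drop i.toNat) tipo.toList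
        then d.modify tipo 0 (· + 1) else d) d).getD t 0
    = d.getD t 0 + (if PySem.Chars.startswith (s.drop i.toNat) t.toList then 1 else 0) := by
  rw [pvInnerAux (fun tipo => PySem.Chars.startswith (s.drop i.toNat) tipo.toList) t pvTipos d,
    List.count_eq_one_of_mem pvTipos_nodup ht]
  norm_num

theorem pvOuter_getD (s : List Char) (t : String) (ht : t ∈ pvTipos) :
    ∀ (is_ : List Int) (d : PySem.Dict String Int),
    (is_.foldl
      (fun d i => pvTipos.foldl
        (fun d tipo =>
          if PySem.Chars.startswith (s.drop i.toNat) tipo.toList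
          then d.modify tipo 0 (· + 1) else d) d) d).getD t 0
    = d.getD t 0 + (is_.countP (fun i => PySem.Chars.startswith (s.drop i.toNat) t.toList) : Int) := by
  intro is_
  induction is_ with
  | nil => intro d; simp
  | cons i is ih =>
    intro d
    rw [List.foldl_cons, ih, pvInner_getD s i d t ht, List.countP_cons]
    by_cases hpt : PySem.Chars.startswith (s.drop i.toNat) t.toList
    · simp [hpt]
      ring
    · simp [hpt]

theorem pvInitAux (t : String) : ∀ (l : List String) (d : PySem.Dict String Int),
    (l.foldl (fun d k => d.insert k 0) d).getD t 0 = if t ∈ l then 0 else d.getD t 0 := by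
  intro l
  induction l with
  | nil => intro d; simp
  | cons k l ih =>
    intro d
    rw [List.foldl_cons, ih, PySem.Dict.getD_insert]
    by_cases h1 : t ∈ l <;> by_cases h2 : t = k <;> simp [h1, h2]

theorem pvInit_getD (t : String) :
    (pvTipos.foldl (fun d tipo => d.insert tipo 0) (PySem.Dict.empty : PySem.Dict String Int)).getD t 0 = 0 := by
  rw [pvInitAux t pvTipos PySem.Dict.empty]
  split
  · rfl
  · exact PySem.Dict.getD_empty t 0

theorem pvPyRange0 (n : Nat) :
    PySem.List.pyRange 0 (n : Int) 1 = (List.range n).map (fun (i : Nat) => (i : Int)) := by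
  rw [PySem.List.pyRange_one]
  simp only [zero_add, Int.sub_zero, Int.toNat_natCast]

theorem pvFoldl_snoc {α : Type} (c : α) : ∀ (xs : List Int) (acc : List α),
    xs.foldl (fun l _ => l ++ [c]) acc = acc ++ List.replicate xs.length c := by
  intro xs
  induction xs with
  | nil => intro acc; simp
  | cons x xs ih =>
    intro acc
    rw [List.foldl_cons, ih, List.length_cons, List.replicate_succ]
    simp

-- the two per-type counts agree
theorem pvCounts_agree (s : List Char) (cat : String) (hcat : cat ∈ pvTipos) :
    pvCountA s cat.toList 0 0
    = ((PySem.List.pyRange 0 (s.length : Int) 1).foldl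
        (fun d i => pvTipos.foldl
          (fun d tipo =>
            if PySem.Chars.startswith (s.drop i.toNat) tipo.toList
            then d.modify tipo 0 (· + 1) else d) d)
        (pvTipos.foldl (fun d tipo => d.insert tipo 0) (PySem.Dict.empty : PySem.Dict String Int))).getD cat 0 := by
  have hne : cat.toList ≠ [] := by
    have : ∀ c ∈ pvTipos, c.toList ≠ [] := by decide
    exact this cat hcat
  rw [pvCountA_eq s cat.toList hne 0 0, pvOuter_getD s cat hcat, pvInit_getD, pvPyRange0]
  unfold pvN
  rw [List.countP_map]
  simp only [zero_add, Nat.sub_zero, ← List.range_eq_range']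
  congr 1

theorem obtener_eq (movimientos : String) :
    obtener_categorias_movimientos movimientos = obtener_categorias_movimientos_alt movimientos := by
  simp only [obtener_categorias_movimientos, obtener_categorias_movimientos_alt]
  apply congrArg (PySem.Str.join " ")
  apply PySem.List.foldl_congr_mem
  intro acc cat hcat
  rw [pvFoldl_snoc, PySem.List.length_pyRange_one, pvCounts_agree movimientos.toList cat hcat]
  simp

-- ===== VERDICT (by name: the statement is the Claim_ definition above) =====
theorem obtener_categorias_movimientos_spec : Claim_equal_obtener_categorias_movimientos := by
  intro movimientos _
  exact obtener_eq movimientos
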